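-- pv_equiv track=rewrite | github.com/WooJJam/Network-Security-and-Blockchain | asymmetric-key encryption/2.py | generate_public_key
-- ===== SOURCE A (Python) =====
-- p = 0xFFFFFFFFFFFFFFFFFFFFFFFFFFFFFFFFFFFFFFFFFFFFFFFFFFFFFFFEFFFFFC2F
--
-- a = 0x0000000000000000000000000000000000000000000000000000000000000000
--
-- b = 0x0000000000000000000000000000000000000000000000000000000000000007
--
-- Gx = 0x79BE667EF9DCBBAC55A06295CE870B07029BFCDB2DCE28D959F2815B16F81798
--
-- Gy = 0x483ADA7726A3C4655DA4FBFC0E1108A8FD17B448A68554199C47D08FFB10D4B8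
--
-- def modinv(a, n):
--     t, newt = 0, 1
--     r, newr = n, a
--
--     while newr != 0:
--         quotient = r // newr
--         t, newt = newt, t - quotient * newt
--         r, newr = newr, r - quotient * newr
--
--     if r > 1:
--         return None
--     if t < 0:
--         t += n
--
--     return t
--
-- def generate_public_key(private_key):
--     # 개인키를 정수로 변환
--     d = int(private_key, 16)
--
--     # Double-and-Add 알고리즘을 이용한 곱셈 연산
--     Qx, Qy = Gx, Gy
--     for i in range(256):
--         if d & (1 << i):
--             Qx, Qy = (Qx * 2 + Qy * 2 + Qx + a) % p, (Qx * 3 + Qy + b) % p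
--         else:
--             Qx, Qy = (Qx * 2 + a) % p, (Qy * 2 + a) % p
--
--     # 곱셈의 역원 계산
--     inv = modinv(d, p)
--
--     # 직선 방정식을 이용한 더하기 연산
--     R = ((Qx * inv ** 2) % p, ((-Qy) * inv ** 3) % p)
--
--     return R
-- ===== SOURCE B (Python) =====
-- p = 0xFFFFFFFFFFFFFFFFFFFFFFFFFFFFFFFFFFFFFFFFFFFFFFFFFFFFFFFEFFFFFC2F
-- a = 0x0000000000000000000000000000000000000000000000000000000000000000
-- b = 0x0000000000000000000000000000000000000000000000000000000000000007
--
-- def modinv(a, n):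
--     t, newt = 0, 1
--     r, newr = n, a
--     while newr != 0:
--         quotient = r // newr
--         t, newt = newt, t - quotient * newt
--         r, newr = newr, r - quotient * newr
--     if r > 1:
--         return None
--     if t < 0:
--         t += n
--     return t
--
-- Gx = 0x79BE667EF9DCBBAC55A06295CE870B07029BFCDB2DCE28D959F2815B16F81798
-- Gy = 0x483ADA7726A3C4655DA4FBFC0E1108A8FD17B448A68554199C47D08FFB10D4B8
--
-- def generate_public_key(private_key):
--     d = int(private_key, 16)
--
--     # Each bit's update is an affine map on (x, y); accumulate their composition
--     # as a 2x3 matrix acting on (x, y, 1) mod p, instead of a running point.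
--     m11, m12, m13 = 1, 0, 0
--     m21, m22, m23 = 0, 1, 0
--     for i in range(256):
--         if d & (1 << i):
--             s11, s12, s13 = 3, 2, a
--             s21, s22, s23 = 3, 1, b
--         else:
--             s11, s12, s13 = 2, 0, a
--             s21, s22, s23 = 0, 2, a
--         m11, m12, m13, m21, m22, m23 = (
--             (s11 * m11 + s12 * m21) % p,
--             (s11 * m12 + s12 * m22) % p,
--             (s11 * m13 + s12 * m23 + s13) % p,
--             (s21 * m11 + s22 * m21) % p,
--             (s21 * m12 + s22 * m22) % p,
--             (s21 * m13 + s22 * m23 + s23) % p,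
--         )
--
--     # Apply the accumulated transform to the base point
--     Qx = (m11 * Gx + m12 * Gy + m13) % p
--     Qy = (m21 * Gx + m22 * Gy + m23) % p
--
--     inv = modinv(d, p)
--     return ((Qx * inv ** 2) % p, ((-Qy) * inv ** 3) % p)
-- ===== Notes on version B (the rewrite author's own statement) =====
-- stated objective: alternative
-- what changed: B maintains the composition of the per-bit affine maps as a 2x3 matrix mod p over the 256 iterations and applies it once to the base point at the end, instead of A's running point updated each iteration.
-- outside the precondition, e.g. on generate_public_key('xyz'): A raises ValueError, B raises ValueError; on generate_public_key('0'): A raises TypeError, B raises TypeError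
import Mathlib
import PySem

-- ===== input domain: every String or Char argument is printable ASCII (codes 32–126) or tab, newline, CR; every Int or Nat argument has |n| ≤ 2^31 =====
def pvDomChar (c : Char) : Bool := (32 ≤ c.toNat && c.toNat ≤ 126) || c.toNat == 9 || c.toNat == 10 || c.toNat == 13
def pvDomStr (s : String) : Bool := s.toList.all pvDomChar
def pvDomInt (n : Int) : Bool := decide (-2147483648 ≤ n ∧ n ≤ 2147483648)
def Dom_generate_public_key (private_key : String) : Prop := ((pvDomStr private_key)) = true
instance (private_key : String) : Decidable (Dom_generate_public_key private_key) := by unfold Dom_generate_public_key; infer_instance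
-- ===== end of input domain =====

-- B replaces A's running-point loop by an accumulated 2x3 affine-transform matrix
-- (mod p) applied once to the base point at the end (objective: alternative).


-- module constants
def pvP : Int := 0xFFFFFFFFFFFFFFFFFFFFFFFFFFFFFFFFFFFFFFFFFFFFFFFFFFFFFFFEFFFFFC2F
def pvA : Int := 0
def pvB : Int := 7
def pvGx : Int := 0x79BE667EF9DCBBAC55A06295CE870B07029BFCDB2DCE28D959F2815B16F81798
def pvGy : Int := 0x483ADA7726A3C4655DA4FBFC0E1108A8FD17B448A68554199C47D08FFB10D4B8

-- shared module helper modinv (identical source in Source A and Source B); while-loop state (t, newt, r, newr)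
def modinvLoop (t newt r newr : Int) : Int × Int :=
  if h : newr = 0 then (t, r)
  else
    modinvLoop newt (t - PySem.Int.floordiv r newr * newt) newr (r - PySem.Int.floordiv r newr * newr)
termination_by newr.natAbs
decreasing_by
  have hm : r - PySem.Int.floordiv r newr * newr = PySem.Int.mod r newr := by
    have := PySem.Int.floordiv_mul_add_mod r newr; omega
  rw [hm]
  rcases lt_or_gt_of_ne h with hn | hp
  · have := PySem.Int.mod_neg_bounds r hn; omega
  · have h1 := PySem.Int.mod_nonneg r hp
    have h2 := PySem.Int.mod_lt r hp
    omega

def modinv (a n : Int) : Option Int :=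
  let (t, r) := modinvLoop 0 1 n a
  if r > 1 then none
  else if t < 0 then some (t + n) else some t

-- shared: Python's truthiness test `d & (1 << i)` (nonzero ↔ bit i set); PySem.Int.band is
-- exact on negatives; i comes from range(256) so i.toNat is exact
def pvBit (d : Int) (i : Int) : Bool := PySem.Int.band d ((1 : Int) <<< i.toNat) != 0

-- ===== PORT A =====
def pvStepA (d : Int) (q : Int × Int) (i : Int) : Int × Int :=
  if pvBit d i then
    (PySem.Int.mod (q.1 * 2 + q.2 * 2 + q.1 + pvA) pvP, PySem.Int.mod (q.1 * 3 + q.2 + pvB) pvP)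
  else
    (PySem.Int.mod (q.1 * 2 + pvA) pvP, PySem.Int.mod (q.2 * 2 + pvA) pvP)

def generate_public_key (private_key : String) : Int × Int :=
  match PySem.Int.ofStrBase? private_key 16 with
  | none => (0, 0)  -- int(s, 16) raises ValueError; excluded by Pre_
  | some d =>
    let q := (PySem.List.pyRange 0 256 1).foldl (pvStepA d) (pvGx, pvGy)
    match modinv d pvP with
    | none => (0, 0)  -- inv ** 2 on None raises TypeError; excluded by Pre_
    | some inv =>
      (PySem.Int.mod (q.1 * inv ^ 2) pvP, PySem.Int.mod ((-q.2) * inv ^ 3) pvP)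

-- ===== PORT B =====
-- matrix state ((m11, m12, m13), (m21, m22, m23))
def pvMat := (Int × Int × Int) × (Int × Int × Int)

def pvStepB (d : Int) (m : pvMat) (i : Int) : pvMat :=
  let s : pvMat := if pvBit d i then ((3, 2, pvA), (3, 1, pvB)) else ((2, 0, pvA), (0, 2, pvA))
  ((PySem.Int.mod (s.1.1 * m.1.1 + s.1.2.1 * m.2.1) pvP,
    PySem.Int.mod (s.1.1 * m.1.2.1 + s.1.2.1 * m.2.2.1) pvP,
    PySem.Int.mod (s.1.1 * m.1.2.2 + s.1.2.1 * m.2.2.2 + s.1.2.2) pvP),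
   (PySem.Int.mod (s.2.1 * m.1.1 + s.2.2.1 * m.2.1) pvP,
    PySem.Int.mod (s.2.1 * m.1.2.1 + s.2.2.1 * m.2.2.1) pvP,
    PySem.Int.mod (s.2.1 * m.1.2.2 + s.2.2.1 * m.2.2.2 + s.2.2.2) pvP))

def generate_public_key_alt (private_key : String) : Int × Int :=
  match PySem.Int.ofStrBase? private_key 16 with
  | none => (0, 0)
  | some d =>
    let m := (PySem.List.pyRange 0 256 1).foldl (pvStepB d) ((1, 0, 0), (0, 1, 0))
    let Qx := PySem.Int.mod (m.1.1 * pvGx + m.1.2.1 * pvGy + m.1.2.2) pvP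
    let Qy := PySem.Int.mod (m.2.1 * pvGx + m.2.2.1 * pvGy + m.2.2.2) pvP
    match modinv d pvP with
    | none => (0, 0)
    | some inv =>
      (PySem.Int.mod (Qx * inv ^ 2) pvP, PySem.Int.mod ((-Qy) * inv ^ 3) pvP)

-- ===== PRECONDITION & SPEC =====
-- Pre_ excludes exactly the inputs where A raises: strings int(s,16) rejects (ValueError)
-- and private keys divisible by p, where modinv returns None and inv ** 2 raises TypeError.
def Pre_generate_public_key (private_key : String) : Prop :=
  PySem.Int.ofStrBase? private_key 16 ≠ none ∧
  PySem.Int.mod ((PySem.Int.ofStrBase? private_key 16).getD 0) pvP ≠ 0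
instance (private_key : String) : Decidable (Pre_generate_public_key private_key) := by unfold Pre_generate_public_key; infer_instance

def pvWitness_generate_public_key : String := "2f"

def Spec_generate_public_key (private_key : String) (out : Int × Int) : Prop := out = generate_public_key_alt private_key
instance (private_key : String) (out : Int × Int) : Decidable (Spec_generate_public_key private_key out) := by unfold Spec_generate_public_key; infer_instance

-- ===== CLAIM (what is proved, stated in full; the proofs are below) =====
def Claim_equal_generate_public_key : Prop := ∀ (private_key : String), Dom_generate_public_key private_key → Pre_generate_public_key private_key → Spec_generate_public_key private_key (generate_public_key private_key)

-- ===== LEMMAS AND PROOFS =====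

-- the affine value a matrix row assigns to the base point (unreduced)
def pvAppX (m : pvMat) : Int := m.1.1 * pvGx + m.1.2.1 * pvGy + m.1.2.2
def pvAppY (m : pvMat) : Int := m.2.1 * pvGx + m.2.2.1 * pvGy + m.2.2.2

lemma pvP_pos : (0 : Int) < pvP := by decide

lemma pv_mod_emod (x : Int) : PySem.Int.mod x pvP = x % pvP :=
  PySem.Int.mod_eq_emod_of_pos pvP_pos

lemma pv_self_mod (x : Int) : x % pvP ≡ x [ZMOD pvP] :=
  Int.emod_emod_of_dvd x dvd_rfl

lemma pv_app_mod (c1 c2 c3 : Int) :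
    (c1 % pvP * pvGx + c2 % pvP * pvGy + c3 % pvP) % pvP = (c1 * pvGx + c2 * pvGy + c3) % pvP := by
  exact (((pv_self_mod c1).mul_right pvGx).add ((pv_self_mod c2).mul_right pvGy)).add (pv_self_mod c3)

-- reducing an affine combination's coefficients mod p does not change its residue
lemma pv_mod2 (s1 s2 s3 X Y c1 c2 c3 : Int)
    (h : X * s1 + Y * s2 + s3 = c1 * pvGx + c2 * pvGy + c3) :
    (X % pvP * s1 + Y % pvP * s2 + s3) % pvP
      = (c1 % pvP * pvGx + c2 % pvP * pvGy + c3 % pvP) % pvP := by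
  rw [pv_app_mod, ← h]
  exact (((pv_self_mod X).mul_right s1).add ((pv_self_mod Y).mul_right s2)).add_right s3

-- one step preserves the invariant "point = matrix applied to G, mod p"
lemma pv_step_inv (d : Int) (i : Int) (q : Int × Int) (m : pvMat)
    (hx : q.1 = pvAppX m % pvP) (hy : q.2 = pvAppY m % pvP) :
    (pvStepA d q i).1 = pvAppX (pvStepB d m i) % pvP ∧
    (pvStepA d q i).2 = pvAppY (pvStepB d m i) % pvP := by
  obtain ⟨⟨m11, m12, m13⟩, ⟨m21, m22, m23⟩⟩ := m
  simp only [pvAppX, pvAppY] at hx hy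
  simp only [pvStepA, pvStepB, pvAppX, pvAppY, pv_mod_emod]
  by_cases hb : pvBit d i = true
  · simp only [hb, if_true]
    rw [hx, hy]
    refine ⟨?_, ?_⟩
    · rw [show ∀ X Y : Int, X % pvP * 2 + Y % pvP * 2 + X % pvP + pvA
          = X % pvP * 3 + Y % pvP * 2 + pvA from fun X Y => by ring]
      exact pv_mod2 3 2 pvA _ _ _ _ _ (by ring)
    · rw [show ∀ X Y : Int, X % pvP * 3 + Y % pvP + pvB
          = X % pvP * 3 + Y % pvP * 1 + pvB from fun X Y => by ring]
      exact pv_mod2 3 1 pvB _ _ _ _ _ (by ring)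
  · simp only [hb, if_false, Bool.false_eq_true]
    rw [hx, hy]
    refine ⟨?_, ?_⟩
    · rw [show ∀ X Y : Int, X % pvP * 2 + pvA
          = X % pvP * 2 + Y % pvP * 0 + pvA from fun X Y => by ring]
      exact pv_mod2 2 0 pvA _ _ _ _ _ (by ring)
    · rw [show ∀ X Y : Int, Y % pvP * 2 + pvA
          = X % pvP * 0 + Y % pvP * 2 + pvA from fun X Y => by ring]
      exact pv_mod2 0 2 pvA _ _ _ _ _ (by ring)

-- the invariant carried through any fold
lemma pv_fold_inv (d : Int) (l : List Int) (q : Int × Int) (m : pvMat)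
    (hx : q.1 = pvAppX m % pvP) (hy : q.2 = pvAppY m % pvP) :
    (l.foldl (pvStepA d) q).1 = pvAppX (l.foldl (pvStepB d) m) % pvP ∧
    (l.foldl (pvStepA d) q).2 = pvAppY (l.foldl (pvStepB d) m) % pvP := by
  induction l generalizing q m with
  | nil => exact ⟨hx, hy⟩
  | cons i l ih =>
    have h := pv_step_inv d i q m hx hy
    exact ih _ _ h.1 h.2

-- ===== VERDICT (by name: the statement is the Claim_ definition above) =====
theorem generate_public_key_spec : Claim_equal_generate_public_key := by
  intro pk _ _
  unfold Spec_generate_public_key generate_public_key generate_public_key_alt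
  cases hparse : PySem.Int.ofStrBase? pk 16 with
  | none => rfl
  | some d =>
    dsimp only
    have hinit_x : pvGx = pvAppX ((1, 0, 0), (0, 1, 0)) % pvP := by decide
    have hinit_y : pvGy = pvAppY ((1, 0, 0), (0, 1, 0)) % pvP := by decide
    have h := pv_fold_inv d (PySem.List.pyRange 0 256 1) (pvGx, pvGy)
      ((1, 0, 0), (0, 1, 0)) hinit_x hinit_y
    cases hm : modinv d pvP with
    | none => rfl
    | some inv =>
      dsimp only
      simp only [pvAppX, pvAppY] at h
      simp only [pv_mod_emod]
      rw [h.1, h.2]
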